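-- pv_equiv track=rewrite | github.com/mercutioviz/kast | kast/plugins/subfinder_plugin.py | _group_subdomains_by_source
-- ===== SOURCE A (Python) =====
-- def _group_subdomains_by_source(subdomains):
--     """
--     Group subdomains by their source.
--     Returns a dictionary where keys are source names and values are lists of subdomains.
--     """
--     groups = {}
--
--     for subdomain in subdomains:
--         source = subdomain['source']
--         if source not in groups:
--             groups[source] = []
--         groups[source].append(subdomain)
--
--     return groups
-- ===== SOURCE B (Python) =====
-- def _group_subdomains_by_source(subdomains):
--     """
--     Group subdomains by their source, in two phases: first collect the
--     distinct source names in first-appearance order, then build each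
--     group with one filtering pass per source.
--     """
--     seen = []
--     for subdomain in subdomains:
--         source = subdomain['source']
--         if source not in seen:
--             seen.append(source)
--     return {source: [s for s in subdomains if s['source'] == source]
--             for source in seen}
-- ===== Notes on version B (the rewrite author's own statement) =====
-- stated objective: alternative
-- what changed: Replaces A's single-pass dict-accumulation (create-empty-then-append per element) with a two-phase scheme: collect distinct sources in first-appearance order, then materialise each group by filtering the input once per source.
import Mathlib
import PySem

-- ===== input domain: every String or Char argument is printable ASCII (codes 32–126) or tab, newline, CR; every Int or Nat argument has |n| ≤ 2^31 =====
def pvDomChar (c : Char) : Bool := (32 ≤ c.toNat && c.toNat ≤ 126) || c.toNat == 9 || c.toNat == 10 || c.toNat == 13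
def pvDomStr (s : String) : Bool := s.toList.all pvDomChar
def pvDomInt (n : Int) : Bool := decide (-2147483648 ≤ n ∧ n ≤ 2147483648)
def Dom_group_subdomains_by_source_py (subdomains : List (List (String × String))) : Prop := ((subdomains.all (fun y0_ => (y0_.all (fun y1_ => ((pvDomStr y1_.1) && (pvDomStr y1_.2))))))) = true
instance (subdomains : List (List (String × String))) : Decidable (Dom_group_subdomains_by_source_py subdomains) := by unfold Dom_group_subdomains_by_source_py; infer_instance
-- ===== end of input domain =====

-- B groups in two phases (distinct sources in first-appearance order, then one filter pass per source)
-- instead of A's single-pass dict accumulation; equal output (return value) is proved on Pre_ (every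
-- subdomain dict has a 'source' key; elsewhere Python A raises KeyError).


-- ===== PORT A =====
-- subdomain['source']: first-match lookup; the .getD "" default is only reached where Python raises
-- KeyError, which Pre_ excludes (both ports read the source through this same helper).
def pvSrc (s : List (String × String)) : String :=
  ((PySem.Dict.mk s).get? "source").getD ""

def group_subdomains_by_source_py (subdomains : List (List (String × String))) : List (String × List (List (String × String))) :=
  (subdomains.foldl
    (fun groups subdomain =>
      let source := pvSrc subdomain
      -- if source not in groups: groups[source] = []
      let groups := if groups.contains source then groups else groups.insert source []
      -- groups[source].append(subdomain)
      groups.modify source [] (fun v => v ++ [subdomain]))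
    PySem.Dict.empty).items

-- ===== PORT B =====
def group_subdomains_by_source_py_alt (subdomains : List (List (String × String))) : List (String × List (List (String × String))) :=
  let seen := subdomains.foldl
    (fun seen subdomain =>
      let source := pvSrc subdomain
      if source ∈ seen then seen else seen ++ [source])
    ([] : List String)
  seen.map (fun source => (source, subdomains.filter (fun s => pvSrc s == source)))

-- ===== PRECONDITION & SPEC =====
-- Pre_ excludes exactly the inputs where some subdomain has no 'source' key: there Python A raises KeyError.
def Pre_group_subdomains_by_source_py (subdomains : List (List (String × String))) : Prop :=
  (subdomains.all (fun s => ((PySem.Dict.mk s).get? "source").isSome)) = true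
instance (subdomains : List (List (String × String))) : Decidable (Pre_group_subdomains_by_source_py subdomains) := by unfold Pre_group_subdomains_by_source_py; infer_instance

def pvWitness_group_subdomains_by_source_py : (List (List (String × String))) :=
  [[("source", "crt.sh"), ("host", "a.example.com")],
   [("source", "dns"), ("host", "b.example.com")],
   [("source", "crt.sh"), ("host", "c.example.com")]]

def Spec_group_subdomains_by_source_py (subdomains : List (List (String × String))) (out : List (String × List (List (String × String)))) : Prop := out = group_subdomains_by_source_py_alt subdomains
instance (subdomains : List (List (String × String))) (out : List (String × List (List (String × String)))) : Decidable (Spec_group_subdomains_by_source_py subdomains out) := by unfold Spec_group_subdomains_by_source_py; infer_instance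

-- ===== CLAIM (what is proved, stated in full; the proofs are below) =====
def Claim_equal_group_subdomains_by_source_py : Prop := ∀ (subdomains : List (List (String × String))), Dom_group_subdomains_by_source_py subdomains → Pre_group_subdomains_by_source_py subdomains → Spec_group_subdomains_by_source_py subdomains (group_subdomains_by_source_py subdomains)

-- ===== LEMMAS AND PROOFS =====

-- A's loop body ('setdefault to []' then append) is one Dict.modify.
lemma pvStep_eq_modify (d : PySem.Dict String (List (List (String × String))))
    (s : List (String × String)) :
    (let source := pvSrc s
     let d' := if d.contains source then d else d.insert source []
     d'.modify source [] (fun v => v ++ [s]))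
    = d.modify (pvSrc s) [] (fun v => v ++ [s]) := by
  by_cases h : d.contains (pvSrc s)
  · simp [h]
  · simp only [Bool.not_eq_true] at h
    simp only [h, Bool.false_eq_true, if_false, PySem.Dict.modify,
      PySem.Dict.getD_insert_self, PySem.Dict.insert_insert_self,
      PySem.Dict.getD_of_not_contains d _ h]

-- A's whole fold, re-keyed through pvSrc: its items are the distinct sources in
-- first-appearance order, each paired with the filtered input.
lemma pvFoldA_items (subdomains : List (List (String × String))) :
    group_subdomains_by_source_py subdomains
    = (PySem.Set.ofList (subdomains.map pvSrc)).map
        (fun k => (k, subdomains.filter (fun s => pvSrc s == k))) := by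
  unfold group_subdomains_by_source_py
  have hfold : subdomains.foldl
      (fun groups subdomain =>
        let source := pvSrc subdomain
        let groups := if groups.contains source then groups else groups.insert source []
        groups.modify source [] (fun v => v ++ [subdomain]))
      PySem.Dict.empty
      = subdomains.foldl (fun d s => d.modify (pvSrc s) [] (fun v => v ++ [s]))
          PySem.Dict.empty := by
    have hf : (fun (groups : PySem.Dict String (List (List (String × String)))) subdomain =>
        let source := pvSrc subdomain
        let groups := if groups.contains source then groups else groups.insert source []
        groups.modify source [] (fun v => v ++ [subdomain]))
        = fun d s => d.modify (pvSrc s) [] (fun v => v ++ [s]) := by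
      funext d s
      exact pvStep_eq_modify d s
    rw [hf]
  rw [hfold]
  have hnodup : (subdomains.foldl (fun d s => d.modify (pvSrc s) [] (fun v => v ++ [s]))
      PySem.Dict.empty).keys.Nodup :=
    PySem.Dict.nodup_keys_foldl_modify_key subdomains pvSrc []
      (fun _ s v => v ++ [s]) PySem.Dict.empty (by simp)
  rw [PySem.Dict.items_eq_map_keys _ hnodup []]
  have hkeys : (subdomains.foldl (fun d s => d.modify (pvSrc s) [] (fun v => v ++ [s]))
      PySem.Dict.empty).keys = PySem.Set.ofList (subdomains.map pvSrc) := by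
    rw [PySem.Dict.keys_foldl_modify_key subdomains pvSrc [] (fun _ s v => v ++ [s])]
    simp [PySem.Dict.keys_empty, PySem.Set.update_nil_left]
  rw [hkeys]
  apply List.map_congr_left
  intro k _
  have hmap : subdomains.foldl (fun d s => d.modify (pvSrc s) [] (fun v => v ++ [s]))
      PySem.Dict.empty
      = (subdomains.map (fun s => (pvSrc s, s))).foldl
          (fun d p => d.modify p.1 [] (fun v => v ++ [p.2])) PySem.Dict.empty := by
    rw [List.foldl_map]
  rw [hmap, PySem.Dict.getD_foldl_modify_append]
  simp [PySem.Dict.getD_empty, List.filter_map, Function.comp_def]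

-- B's first phase builds exactly set(subdomains.map pvSrc) in first-appearance order.
lemma pvSeen_eq_ofList (subdomains : List (List (String × String))) :
    subdomains.foldl
      (fun seen subdomain =>
        let source := pvSrc subdomain
        if source ∈ seen then seen else seen ++ [source])
      ([] : List String)
    = PySem.Set.ofList (subdomains.map pvSrc) := by
  rw [← PySem.Set.update_nil_left, PySem.Set.update_map_eq_foldl_add]
  have hf : (fun (s : PySem.Set String) b => PySem.Set.add s (pvSrc b))
      = fun (seen : List String) subdomain =>
        let source := pvSrc subdomain
        if source ∈ seen then seen else seen ++ [source] := by
    funext s b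
    exact PySem.Set.add_eq_ite s (pvSrc b)
  rw [hf]

-- ===== VERDICT (by name: the statement is the Claim_ definition above) =====
theorem group_subdomains_by_source_py_spec : Claim_equal_group_subdomains_by_source_py := by
  intro subdomains _ _
  unfold Spec_group_subdomains_by_source_py group_subdomains_by_source_py_alt
  rw [pvSeen_eq_ofList, pvFoldA_items]
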